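-- pv_equiv track=rewrite | github.com/Kuraretto/picoCTF-Cryptography | transposition-trial/script.py | recover_scrambled
-- ===== SOURCE A (Python) =====
-- def recover_scrambled(s: str) -> str:
--     """Recover a string where every 3-char block was scrambled.
--     For each scrambled block `b0 b1 b2` the original was `b2 b0 b1`."""
--     out_chars = []
--     for i in range(0, len(s), 3):
--         block = s[i:i+3]
--         if len(block) < 3:
--             # append any leftover (1 or 2 chars) unchanged
--             out_chars.append(block)
--         else:
--             out_chars.append(block[2] + block[0] + block[1])
--     return ''.join(out_chars)
-- ===== SOURCE B (Python) =====
-- import re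
--
--
-- def recover_scrambled(s: str) -> str:
--     """Recover a string where every 3-char block was scrambled.
--     For each scrambled block `b0 b1 b2` the original was `b2 b0 b1`."""
--     # The regex matches each consecutive triple (DOTALL so '.' matches
--     # newlines too); any 1- or 2-char remainder is left untouched.
--     return re.sub(r'(.)(.)(.)', r'\3\1\2', s, flags=re.S)
-- ===== Notes on version B (the rewrite author's own statement) =====
-- stated objective: idiomatic
-- what changed: Replaces the explicit index loop with slicing, branching and list-joining by a single regex substitution that matches each consecutive character triple and reorders it in the replacement template.
import Mathlib
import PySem

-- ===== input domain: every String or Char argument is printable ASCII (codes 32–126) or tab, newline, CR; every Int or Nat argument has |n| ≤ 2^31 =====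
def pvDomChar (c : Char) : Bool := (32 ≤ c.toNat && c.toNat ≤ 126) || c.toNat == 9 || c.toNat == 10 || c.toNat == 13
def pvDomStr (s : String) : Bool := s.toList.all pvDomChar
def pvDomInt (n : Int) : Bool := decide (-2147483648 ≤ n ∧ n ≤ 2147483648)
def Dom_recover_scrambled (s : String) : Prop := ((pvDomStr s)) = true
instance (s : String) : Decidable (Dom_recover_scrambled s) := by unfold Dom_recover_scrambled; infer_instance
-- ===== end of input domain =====

-- B replaces A's index loop over 3-char slices by a single regex substitution
-- (idiomatic one-liner); here ported as the regex engine's left-to-right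
-- triple-consuming scan.

-- ===== PORT A =====
-- one loop-body step: block = s[i:i+3]; short block kept, else block[2]+block[0]+block[1]
-- (indices 2,0,1 are in range in the else branch since the block has length 3,
-- so List.getD with a dummy default is exact there)
def recover_scrambled_body (cs : List Char) (out_chars : List (List Char)) (i : Int) : List (List Char) :=
  let block := PySem.List.slice cs (some i) (some (i + 3))
  if block.length < 3 then
    out_chars ++ [block]
  else
    out_chars ++ [[block.getD 2 ' ', block.getD 0 ' ', block.getD 1 ' ']]

def recover_scrambled (s : String) : String :=
  let cs := s.toList
  let out_chars := (PySem.List.pyRange 0 (cs.length : Int) 3).foldl (recover_scrambled_body cs) []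
  String.ofList (PySem.Chars.join [] out_chars)

-- ===== PORT B =====
-- the regex r'(.)(.)(.)' → r'\3\1\2' (DOTALL): consume consecutive triples
-- left to right, emit them reordered, leave the <3-char remainder unchanged
def scrambleSub : List Char → List Char
  | a :: b :: c :: rest => c :: a :: b :: scrambleSub rest
  | rest => rest

def recover_scrambled_alt (s : String) : String :=
  String.ofList (scrambleSub s.toList)

-- ===== PRECONDITION & SPEC =====
def Spec_recover_scrambled (s : String) (out : String) : Prop := out = recover_scrambled_alt s
instance (s : String) (out : String) : Decidable (Spec_recover_scrambled s out) := by unfold Spec_recover_scrambled; infer_instance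

-- ===== CLAIM (what is proved, stated in full; the proofs are below) =====
def Claim_equal_recover_scrambled : Prop := ∀ (s : String), Dom_recover_scrambled s → Spec_recover_scrambled s (recover_scrambled s)

-- ===== LEMMAS AND PROOFS =====

theorem join_nil_eq_flatten (l : List (List Char)) : PySem.Chars.join [] l = l.flatten := by
  induction l with
  | nil => rfl
  | cons a t ih =>
    cases t with
    | nil => simp [PySem.Chars.join_singleton]
    | cons b t2 => rw [PySem.Chars.join_cons_cons]; simp_all

theorem pyRange_three_cons (a b : Int) (h : a < b) :
    PySem.List.pyRange a b 3 = a :: PySem.List.pyRange (a + 3) b 3 := by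
  rw [PySem.List.pyRange_of_pos a b (by norm_num), PySem.List.pyRange_of_pos (a + 3) b (by norm_num)]
  by_cases h3 : a + 3 < b
  · have hcnt : ((b - a + 3 - 1) / 3).toNat = ((b - (a + 3) + 3 - 1) / 3).toNat + 1 := by
      omega
    simp only [if_pos h, if_pos h3, hcnt, List.range_succ_eq_map, List.map_cons, List.map_map]
    refine congrArg₂ List.cons (by simp) ?_
    apply List.map_congr_left; intro k _; simp; ring
  · have hcnt : ((b - a + 3 - 1) / 3).toNat = 1 := by omega
    simp only [if_pos h, if_neg h3, hcnt]
    simp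

-- the loop of A, started at offset m into the full list, produces acc ++ the
-- triple-blocks of the tail cs = full.drop m
theorem loopA (n : Nat) : ∀ (cs full : List Char) (m : Nat) (acc : List (List Char)),
    cs.length = n → full.drop m = cs → m + cs.length = full.length →
    ((PySem.List.pyRange (m : Int) (full.length : Int) 3).foldl (recover_scrambled_body full) acc).flatten
      = acc.flatten ++ scrambleSub cs := by
  induction n using Nat.strong_induction_on with
  | _ n ih =>
    intro cs full m acc hn hdrop hlen
    have hslice : PySem.List.slice full (some (m : Int)) (some ((m : Int) + 3)) = cs.take 3 := by
      rw [show ((m : Int) + 3) = ((m : Int) + ((3 : Nat) : Int)) by norm_num,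
        PySem.List.slice_natCast_add full m 3, hdrop]
    match cs, hn, hdrop, hlen, hslice with
    | [], _, hdrop, hlen, hslice =>
      simp only [List.length_nil, Nat.add_zero] at hlen
      rw [PySem.List.pyRange_of_pos _ _ (by norm_num : (0:Int) < 3),
        if_neg (by omega : ¬ ((m : Int) < (full.length : Int)))]
      simp [scrambleSub]
    | [a], _, hdrop, hlen, hslice =>
      simp only [List.length_cons, List.length_nil] at hlen
      rw [pyRange_three_cons _ _ (by omega), List.foldl_cons,
        PySem.List.pyRange_of_pos _ _ (by norm_num : (0:Int) < 3),
        if_neg (by omega : ¬ ((m : Int) + 3 < (full.length : Int)))]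
      simp only [List.range_zero, List.map_nil, List.foldl_nil]
      simp [recover_scrambled_body, hslice, scrambleSub]
    | [a, b], _, hdrop, hlen, hslice =>
      simp only [List.length_cons, List.length_nil] at hlen
      rw [pyRange_three_cons _ _ (by omega), List.foldl_cons,
        PySem.List.pyRange_of_pos _ _ (by norm_num : (0:Int) < 3),
        if_neg (by omega : ¬ ((m : Int) + 3 < (full.length : Int)))]
      simp only [List.range_zero, List.map_nil, List.foldl_nil]
      simp [recover_scrambled_body, hslice, scrambleSub]
    | (a :: b :: c :: rest), hn3, hdrop, hlen, hslice =>
      simp only [List.length_cons] at hlen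
      rw [pyRange_three_cons _ _ (by omega), List.foldl_cons]
      have hbody : recover_scrambled_body full acc (m : Int) = acc ++ [[c, a, b]] := by
        simp [recover_scrambled_body, hslice]
      rw [hbody, show ((m : Int) + 3) = ((m + 3 : Nat) : Int) by push_cast; ring]
      rw [ih rest.length (by simp only [List.length_cons] at hn3; omega) rest full (m + 3)
        (acc ++ [[c, a, b]]) rfl
        (by rw [← List.drop_drop, hdrop]; rfl)
        (by omega)]
      simp [scrambleSub]

-- ===== VERDICT (by name: the statement is the Claim_ definition above) =====
theorem recover_scrambled_spec : Claim_equal_recover_scrambled := by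
  intro s _
  unfold Spec_recover_scrambled recover_scrambled recover_scrambled_alt
  simp only [join_nil_eq_flatten]
  congr 1
  have := loopA s.toList.length s.toList s.toList 0 [] rfl rfl (by simp)
  simpa using this
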